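-- pv_equiv track=rewrite | github.com/HeatzRM/industrial-statistics-tools | descriptive_statistics/median.py | create_cumulative_frequency
-- ===== SOURCE A (Python) =====
-- def create_cumulative_frequency(items=[{}]):
--     for index, item in enumerate(items):
--         if index != 0:
--             item["CF"] = item["freq"] + items[index - 1]["CF"]
--         else:
--             item["CF"] = item["freq"]
--         items[index] = item
--     return items
-- ===== SOURCE B (Python) =====
-- def create_cumulative_frequency(items=[{}]):
--     remaining = sum(item["freq"] for item in items)
--     for item in reversed(items):
--         item["CF"] = remaining
--         remaining -= item["freq"]
--     return items
-- ===== Notes on version B (the rewrite author's own statement) =====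
-- stated objective: alternative
-- what changed: Replaces A's forward read-previous-CF recurrence by a two-phase scheme: first sum all frequencies, then traverse the list in REVERSE assigning the remaining total as CF and subtracting each frequency, using that CF[i] = total - sum of later freqs.
import Mathlib
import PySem

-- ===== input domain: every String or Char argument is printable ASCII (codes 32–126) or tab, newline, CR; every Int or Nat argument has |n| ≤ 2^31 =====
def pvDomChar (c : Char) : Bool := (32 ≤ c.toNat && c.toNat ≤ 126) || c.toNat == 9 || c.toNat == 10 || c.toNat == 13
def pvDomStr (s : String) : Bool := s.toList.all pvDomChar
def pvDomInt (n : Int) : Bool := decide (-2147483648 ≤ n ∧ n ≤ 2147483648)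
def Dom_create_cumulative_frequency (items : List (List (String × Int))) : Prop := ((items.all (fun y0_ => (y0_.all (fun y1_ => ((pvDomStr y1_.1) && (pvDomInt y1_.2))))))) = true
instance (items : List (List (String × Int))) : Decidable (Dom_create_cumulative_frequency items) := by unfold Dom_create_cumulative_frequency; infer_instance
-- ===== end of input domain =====

-- B replaces A's forward read-previous-CF recurrence by two phases: sum all frequencies, then a
-- REVERSE traversal assigning the remaining total as CF and subtracting each frequency.
-- In Python both mutate the dicts in place; the equivalence proved here is about the returned list.

-- ===== PORT A =====
-- dict primitives shared by both ports (assoc list, first-match lookup; keys are distinct in a Python dict):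
-- d[k] with the key present (guaranteed by Pre_ for "freq", by construction for "CF"); 0 is unreachable under Pre_
def pvGetKey (k : String) (d : List (String × Int)) : Int :=
  match List.lookup k d with
  | some v => v
  | none => 0
-- d[k] = v : overwrite in place if present, else append (exact for the duplicate-free lists a Python dict yields)
def pvSetKey (k : String) (v : Int) : List (String × Int) → List (String × Int)
  | [] => [(k, v)]
  | (k', v') :: t => if k' = k then (k, v) :: t else (k', v') :: pvSetKey k v t

-- the for-loop: carries the previously stored (updated) dict, as items[index-1] is after 'items[index] = item'
def pvALoop (prev : Option (List (String × Int))) : List (List (String × Int)) → List (List (String × Int))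
  | [] => []
  | item :: rest =>
    let cf : Int :=
      match prev with
      | some p => pvGetKey "freq" item + pvGetKey "CF" p   -- index ≠ 0 branch
      | none => pvGetKey "freq" item                       -- index = 0 branch
    let item' := pvSetKey "CF" cf item
    item' :: pvALoop (some item') rest

def create_cumulative_frequency (items : List (List (String × Int))) : List (List (String × Int)) :=
  pvALoop none items

-- ===== PORT B =====
-- remaining = sum(item["freq"] for item in items)
def pvSumFreq (items : List (List (String × Int))) : Int :=
  items.foldl (fun acc item => acc + pvGetKey "freq" item) 0
-- the reverse for-loop: processes the REVERSED list, assigning remaining then subtracting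
def pvBRev (remaining : Int) : List (List (String × Int)) → List (List (String × Int))
  | [] => []
  | item :: rest => pvSetKey "CF" remaining item :: pvBRev (remaining - pvGetKey "freq" item) rest

def create_cumulative_frequency_alt (items : List (List (String × Int))) : List (List (String × Int)) :=
  (pvBRev (pvSumFreq items) items.reverse).reverse

-- ===== PRECONDITION & SPEC =====
-- A raises KeyError when some dict lacks the key "freq"; exactly those inputs are excluded.
def Pre_create_cumulative_frequency (items : List (List (String × Int))) : Prop :=
  ∀ d ∈ items, (List.lookup "freq" d).isSome = true
instance (items : List (List (String × Int))) : Decidable (Pre_create_cumulative_frequency items) := by unfold Pre_create_cumulative_frequency; infer_instance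
def pvWitness_create_cumulative_frequency : (List (List (String × Int))) := [[("freq", 2)], [("freq", 3), ("x", 1)]]

def Spec_create_cumulative_frequency (items : List (List (String × Int))) (out : List (List (String × Int))) : Prop := out = create_cumulative_frequency_alt items
instance (items : List (List (String × Int))) (out : List (List (String × Int))) : Decidable (Spec_create_cumulative_frequency items out) := by unfold Spec_create_cumulative_frequency; infer_instance

-- ===== CLAIM =====
def Claim_equal_create_cumulative_frequency : Prop := ∀ (items : List (List (String × Int))), Dom_create_cumulative_frequency items → Pre_create_cumulative_frequency items → Spec_create_cumulative_frequency items (create_cumulative_frequency items)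

-- ===== LEMMAS AND PROOFS =====
-- proof-side reference: the forward running-total pass
def pvFwd (t : Int) : List (List (String × Int)) → List (List (String × Int))
  | [] => []
  | item :: rest =>
    let t' := t + pvGetKey "freq" item
    pvSetKey "CF" t' item :: pvFwd t' rest

theorem lookup_pvSetKey_self (v : Int) (d : List (String × Int)) :
    List.lookup "CF" (pvSetKey "CF" v d) = some v := by
  induction d with
  | nil => simp [pvSetKey]
  | cons p t ih =>
    obtain ⟨k', v'⟩ := p
    by_cases h : k' = "CF"
    · simp [pvSetKey, h]
    · have hne : ("CF" == k') = false := by simp [Ne.symm h]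
      simp [pvSetKey, h, List.lookup, hne, ih]

theorem pvALoop_eq_pvFwd (rest : List (List (String × Int))) (p : List (String × Int)) (t : Int)
    (h : pvGetKey "CF" p = t) : pvALoop (some p) rest = pvFwd t rest := by
  induction rest generalizing p t with
  | nil => rfl
  | cons item tail ih =>
    simp only [pvALoop, pvFwd, h, Int.add_comm (pvGetKey "freq" item) t]
    rw [ih _ (t + pvGetKey "freq" item) (by simp [pvGetKey, lookup_pvSetKey_self])]

theorem a_eq_pvFwd (items : List (List (String × Int))) :
    create_cumulative_frequency items = pvFwd 0 items := by
  unfold create_cumulative_frequency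
  cases items with
  | nil => rfl
  | cons item rest =>
    simp only [pvALoop, pvFwd, Int.zero_add]
    rw [pvALoop_eq_pvFwd rest _ (pvGetKey "freq" item) (by simp [pvGetKey, lookup_pvSetKey_self])]

theorem pvSum_shift (l : List (List (String × Int))) (c : Int) :
    l.foldl (fun acc item => acc + pvGetKey "freq" item) c
      = c + l.foldl (fun acc item => acc + pvGetKey "freq" item) 0 := by
  induction l generalizing c with
  | nil => simp
  | cons b tb ihb => simp only [List.foldl_cons]; rw [ihb, ihb (0 + _)]; ring

theorem pvSum_reverse (l : List (List (String × Int))) :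
    l.reverse.foldl (fun acc item => acc + pvGetKey "freq" item) 0
      = l.foldl (fun acc item => acc + pvGetKey "freq" item) 0 := by
  induction l with
  | nil => rfl
  | cons a t ih =>
    simp only [List.reverse_cons, List.foldl_append, List.foldl_cons, List.foldl_nil,
      List.foldl_cons]
    rw [pvSum_shift t.reverse, ih, pvSum_shift t (0 + pvGetKey "freq" a)]
    ring

theorem pvBRev_append (r : Int) (xs ys : List (List (String × Int))) :
    pvBRev r (xs ++ ys) =
      pvBRev r xs ++ pvBRev (r - xs.foldl (fun acc item => acc + pvGetKey "freq" item) 0) ys := by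
  induction xs generalizing r with
  | nil => simp [pvBRev]
  | cons a t ih =>
    simp only [List.cons_append, pvBRev, ih, List.foldl_cons]
    congr 2
    rw [pvSum_shift t (0 + pvGetKey "freq" a)]
    ring_nf

theorem pvBRev_reverse_eq_pvFwd (l : List (List (String × Int))) (t : Int) :
    pvBRev (t + l.foldl (fun acc item => acc + pvGetKey "freq" item) 0) l.reverse
      = (pvFwd t l).reverse := by
  induction l generalizing t with
  | nil => simp [pvBRev, pvFwd]
  | cons a tail tih =>
    simp only [List.reverse_cons, List.foldl_cons, pvBRev_append, pvFwd, List.reverse_cons]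
    rw [pvSum_shift tail (0 + pvGetKey "freq" a), pvSum_reverse tail]
    have e1 : t + (0 + pvGetKey "freq" a + tail.foldl (fun acc item => acc + pvGetKey "freq" item) 0)
        = (t + pvGetKey "freq" a) + tail.foldl (fun acc item => acc + pvGetKey "freq" item) 0 := by ring
    rw [e1, tih (t + pvGetKey "freq" a)]
    congr 1
    have e2 : t + pvGetKey "freq" a + tail.foldl (fun acc item => acc + pvGetKey "freq" item) 0
        - tail.foldl (fun acc item => acc + pvGetKey "freq" item) 0 = t + pvGetKey "freq" a := by ring
    rw [e2]
    rfl

-- ===== VERDICT =====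
theorem create_cumulative_frequency_spec : Claim_equal_create_cumulative_frequency := by
  intro items _ _
  unfold Spec_create_cumulative_frequency create_cumulative_frequency_alt pvSumFreq
  have := pvBRev_reverse_eq_pvFwd items 0
  rw [Int.zero_add] at this
  rw [this, List.reverse_reverse, a_eq_pvFwd]
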